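-- pv_equiv track=rewrite | github.com/edward-fc/Introduction-to-Programming | Assignement/cwk1.py | valid_char_in_string
-- ===== SOURCE A (Python) =====
-- def valid_char_in_string(poplist, charset):
--     """
--     This function takes two arguments popList and charSet,
--     in which popList is a list of strings and
--     charSet is a list of strings with a length of 1 (a character).
--     This function returns a Boolean False if any string
--     in popList contains characters not in charSet,
--     or invalid charSet. Otherwise, returns a Boolean True.
--     Examples of valid charSet are ['0', '1'], ['-', '*'].
--
--     """
--     #Initialisation of the Variables
--     results = True
--     count = 0
--     #Checking if charset is a list
--
--     if not isinstance(charset, list):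
--         return False
--     #Enumerate all string in the list of list and Compare it with the string in charset
--     #Then we count the number of times the element was different to the charset element
--     for element_poplist in poplist:
--         for string in element_poplist:
--             for element_charset in charset:
--                 if string != element_charset:
--                     count += 1
--                     if count == len(charset):
--                         results = False
--             count = 0
--     return results
-- ===== SOURCE B (Python) =====
-- def valid_char_in_string(poplist, charset):
--     # Strategy: concatenate all the strings, then delete every occurrence of each
--     # allowed character with str.replace; the input is valid iff nothing is left.
--     # (Only length-1 charset entries are characters; longer entries can never
--     # match a single char, so they delete nothing.)
--     if not isinstance(charset, list):
--         return False
--     if not charset: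
--         return True
--     leftover = "".join(poplist)
--     for ch in charset:
--         if len(ch) == 1:
--             leftover = leftover.replace(ch, "")
--     return leftover == ""
-- ===== Notes on version B (the rewrite author's own statement) =====
-- stated objective: faster
-- what changed: Instead of counting mismatches of each character against every charset element in a triple nested loop, B concatenates all strings once and deletes every occurrence of each allowed character with str.replace, returning whether anything is left.
import Mathlib
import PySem

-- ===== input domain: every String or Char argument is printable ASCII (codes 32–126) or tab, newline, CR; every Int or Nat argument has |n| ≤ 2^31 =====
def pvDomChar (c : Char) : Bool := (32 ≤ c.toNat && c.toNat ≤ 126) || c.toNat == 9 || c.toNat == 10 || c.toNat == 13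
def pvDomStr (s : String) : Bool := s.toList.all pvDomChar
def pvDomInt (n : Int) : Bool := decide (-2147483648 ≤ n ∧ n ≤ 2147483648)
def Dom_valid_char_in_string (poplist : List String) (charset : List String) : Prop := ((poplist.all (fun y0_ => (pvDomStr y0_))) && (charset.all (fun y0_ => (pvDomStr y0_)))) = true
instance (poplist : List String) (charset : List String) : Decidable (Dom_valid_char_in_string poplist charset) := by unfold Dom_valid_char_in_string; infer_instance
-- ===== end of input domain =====

-- B replaces A's triple nested mismatch-counting loop by concatenating the strings once
-- and deleting each allowed character with str.replace, then testing emptiness.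

-- ===== PORT A =====
-- one pass of the innermost `for element_charset in charset` loop body
def pvAStep (N : Int) (c : Char) (st : Bool × Int) (e : String) : Bool × Int :=
  if String.ofList [c] ≠ e then
    ((if st.2 + 1 = N then false else st.1), st.2 + 1)
  else st

def valid_char_in_string (poplist : List String) (charset : List String) : Bool :=
  -- results = True; count = 0; (charset is a list by the type, so the isinstance guard is vacuous)
  let fin := poplist.foldl (fun st s =>
    s.toList.foldl (fun st c =>
      let st2 := charset.foldl (pvAStep (charset.length : Int) c) st
      (st2.1, 0)) st) ((true : Bool), (0 : Int))
  fin.1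

-- ===== PORT B =====
def valid_char_in_string_alt (poplist : List String) (charset : List String) : Bool :=
  if charset = [] then true
  else
    let leftover := charset.foldl
      (fun lv ch => if PySem.Str.len ch = 1 then PySem.Str.replace lv ch "" else lv)
      (PySem.Str.join "" poplist)
    leftover == ""

-- ===== PRECONDITION & SPEC =====
def Spec_valid_char_in_string (poplist : List String) (charset : List String) (out : Bool) : Prop := out = valid_char_in_string_alt poplist charset
instance (poplist : List String) (charset : List String) (out : Bool) : Decidable (Spec_valid_char_in_string poplist charset out) := by unfold Spec_valid_char_in_string; infer_instance

-- ===== CLAIM (what is proved, stated in full; the proofs are below) =====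
def Claim_equal_valid_char_in_string : Prop := ∀ (poplist : List String) (charset : List String), Dom_valid_char_in_string poplist charset → Spec_valid_char_in_string poplist charset (valid_char_in_string poplist charset)

-- ===== LEMMAS AND PROOFS =====

-- ---- A-side: closed form of the mismatch-counting loop ----

-- number of mismatches of character c against the list l, as an Int
def pvMis (c : Char) (l : List String) : Int :=
  (l.countP (fun e => decide (String.ofList [c] ≠ e)) : Int)

theorem pvMis_nil (c : Char) : pvMis c [] = 0 := rfl

theorem pvMis_cons (c : Char) (e : String) (l : List String) :
    pvMis c (e :: l) = (if String.ofList [c] ≠ e then 1 else 0) + pvMis c l := by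
  by_cases h : String.ofList [c] ≠ e <;> simp [pvMis, h] <;> omega

theorem pvMis_nonneg (c : Char) (l : List String) : 0 ≤ pvMis c l := by
  simp [pvMis]

-- if the running count can never reach N during l, the fold just counts mismatches
theorem pvA_fold_low (N : Int) (c : Char) (l : List String) :
    ∀ (r : Bool) (k : Int), k + pvMis c l < N →
      l.foldl (pvAStep N c) (r, k) = (r, k + pvMis c l) := by
  induction l with
  | nil => intro r k h; simp [pvMis_nil]
  | cons e rest ih =>
    intro r k h
    rw [pvMis_cons] at h
    by_cases hm : String.ofList [c] ≠ e
    · have hrest := pvMis_nonneg c rest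
      have hne : ¬ (k + 1 = N) := by simp [hm] at h; omega
      simp only [List.foldl_cons, pvAStep, if_pos hm, if_neg hne]
      rw [ih r (k + 1) (by simp [hm] at h ⊢; omega)]
      simp [pvMis_cons, hm]; ring
    · simp only [List.foldl_cons, pvAStep, if_neg hm]
      rw [ih r k (by simp [hm] at h ⊢; omega)]
      simp [pvMis_cons, hm]

-- if every element of l mismatches and the count would exactly reach N, results flips to false
theorem pvA_fold_all_mis (N : Int) (c : Char) (l : List String) :
    ∀ (r : Bool) (k : Int), l ≠ [] → (∀ e ∈ l, String.ofList [c] ≠ e) → k + (l.length : Int) = N →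
      (l.foldl (pvAStep N c) (r, k)).1 = false := by
  induction l with
  | nil => intro r k h; exact absurd rfl h
  | cons e rest ih =>
    intro r k _ hall hlen
    have hm : String.ofList [c] ≠ e := hall e (by simp)
    simp only [List.foldl_cons, pvAStep, if_pos hm]
    cases rest with
    | nil =>
      have : k + 1 = N := by simp at hlen; omega
      simp [this]
    | cons e2 rest2 =>
      apply ih _ (k + 1) (by simp) (fun x hx => hall x (by simp [hx]))
      simp at hlen ⊢; omega

-- processing one character from state (r, 0): r becomes r && (c used is in charset)
theorem pvA_char_step (charset : List String) (hne : charset ≠ []) (c : Char) (r : Bool) :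
    (charset.foldl (pvAStep (charset.length : Int) c) (r, 0)).1
      = (r && decide (String.ofList [c] ∈ charset)) := by
  by_cases hmem : String.ofList [c] ∈ charset
  · have hlt : (0 : Int) + pvMis c charset < (charset.length : Int) := by
      have hle := List.countP_le_length (l := charset) (p := fun e => decide (String.ofList [c] ≠ e))
      have hne2 : charset.countP (fun e => decide (String.ofList [c] ≠ e)) ≠ charset.length := by
        intro hcp
        have := (List.countP_eq_length (l := charset)
          (p := fun e => decide (String.ofList [c] ≠ e))).mp hcp (String.ofList [c]) hmem
        simp at this
      simp [pvMis]; omega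
    rw [pvA_fold_low _ _ _ r 0 hlt]
    simp [hmem]
  · rw [pvA_fold_all_mis _ _ _ r 0 hne
        (fun e he h => hmem (h ▸ he)) (by simp)]
    simp [hmem]

theorem pvA_string_fold (charset : List String) (hne : charset ≠ []) (cl : List Char) :
    ∀ (r : Bool),
      cl.foldl (fun st c =>
          let st2 := charset.foldl (pvAStep (charset.length : Int) c) st
          (st2.1, 0)) (r, (0 : Int))
        = ((r && cl.all fun c => decide (String.ofList [c] ∈ charset)), 0) := by
  induction cl with
  | nil => intro r; simp
  | cons c rest ih =>
    intro r
    simp only [List.foldl_cons]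
    rw [show (charset.foldl (pvAStep (charset.length : Int) c) (r, 0)).1
          = (r && decide (String.ofList [c] ∈ charset)) from pvA_char_step charset hne c r]
    rw [ih (r && decide (String.ofList [c] ∈ charset))]
    simp [Bool.and_assoc]

theorem pvA_closed (poplist charset : List String) (hne : charset ≠ []) :
    valid_char_in_string poplist charset
      = poplist.all fun s => s.toList.all fun c => decide (String.ofList [c] ∈ charset) := by
  unfold valid_char_in_string
  suffices h : ∀ (r : Bool),
      (poplist.foldl (fun st s =>
        s.toList.foldl (fun st c =>
          let st2 := charset.foldl (pvAStep (charset.length : Int) c) st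
          (st2.1, 0)) st) (r, (0 : Int)))
      = ((r && poplist.all fun s => s.toList.all fun c => decide (String.ofList [c] ∈ charset)), 0) by
    simp [h true]
  induction poplist with
  | nil => intro r; simp
  | cons s rest ih =>
    intro r
    simp only [List.foldl_cons]
    rw [pvA_string_fold charset hne s.toList r, ih]
    simp [Bool.and_assoc]

-- ---- B-side: replace deletes exactly the occurrences of a character ----

-- the worker of PySem.Chars.replace with a single-char pattern and empty replacement filters
theorem pvGo_singleton (a : Char) :
    ∀ (fuel : Nat) (l : List Char) (acc : List Char), l.length ≤ fuel →
      PySem.Chars.replace.go [a] [] fuel l acc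
        = acc.reverse ++ l.filter (fun c => decide (c ≠ a)) := by
  intro fuel
  induction fuel with
  | zero =>
    intro l acc h
    have : l = [] := List.length_eq_zero_iff.mp (Nat.le_zero.mp h)
    subst this
    simp [PySem.Chars.replace.go]
  | succ n ih =>
    intro l acc h
    cases l with
    | nil => simp [PySem.Chars.replace.go]
    | cons c t =>
      by_cases hc : c = a
      · subst hc
        have hp : ([c].isPrefixOf (c :: t)) = true := by simp [List.isPrefixOf]
        simp only [PySem.Chars.replace.go, hp, if_pos, List.reverse_nil, List.nil_append]
        rw [show List.drop [c].length (c :: t) = t from rfl]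
        rw [ih t acc (by simpa using Nat.le_of_succ_le_succ h)]
        simp
      · have hp : ([a].isPrefixOf (c :: t)) = false := by
          simp [List.isPrefixOf]; exact fun h' => hc h'.symm
        simp only [PySem.Chars.replace.go, hp]
        rw [if_neg (by simp)]
        rw [ih t (c :: acc) (by simpa using Nat.le_of_succ_le_succ h)]
        simp [hc]

theorem pvReplace_singleton (a : Char) (l : List Char) :
    PySem.Chars.replace l [a] [] = l.filter (fun c => decide (c ≠ a)) := by
  rw [PySem.Chars.replace]
  simp only [List.isEmpty_cons]
  rw [pvGo_singleton a l.length l [] (le_refl _)]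
  simp

-- each loop step of B filters out the chars matching ch (if ch is a character)
theorem pvB_step (s : String) (ch : String) :
    (if PySem.Str.len ch = 1 then PySem.Str.replace s ch "" else s).toList
      = s.toList.filter (fun c => decide (String.ofList [c] ≠ ch)) := by
  by_cases h1 : PySem.Str.len ch = 1
  · have hlen : ch.toList.length = 1 := by
      simpa [PySem.Str.len] using h1
    obtain ⟨a, ha⟩ := List.length_eq_one_iff.mp hlen
    rw [if_pos h1, PySem.Str.toList_replace, ha, String.toList_empty, pvReplace_singleton]
    apply List.filter_congr
    intro c _
    have hiff : (String.ofList [c] = ch) ↔ c = a := by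
      rw [String.ext_iff, String.toList_ofList, ha]
      simp
    simp [hiff]
  · rw [if_neg h1]
    have : ∀ c ∈ s.toList, (decide (String.ofList [c] ≠ ch)) = true := by
      intro c _
      simp only [decide_eq_true_iff]
      intro h
      apply h1
      rw [← h]
      simp [PySem.Str.len]
    exact (List.filter_eq_self.mpr this).symm

-- the whole loop of B filters out every char that occurs (as a singleton string) in charset
theorem pvB_fold (charset : List String) :
    ∀ (s : String),
      (charset.foldl
        (fun lv ch => if PySem.Str.len ch = 1 then PySem.Str.replace lv ch "" else lv) s).toList
      = s.toList.filter (fun c => decide (String.ofList [c] ∉ charset)) := by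
  induction charset with
  | nil => intro s; simp
  | cons ch rest ih =>
    intro s
    simp only [List.foldl_cons]
    rw [ih, pvB_step, List.filter_filter]
    apply List.filter_congr
    intro c _
    simp [not_or]
    exact Bool.and_comm _ _

-- joining with the empty separator is flattening
theorem pvJoin_empty (parts : List (List Char)) :
    PySem.Chars.join [] parts = parts.flatten := by
  induction parts with
  | nil => simp [PySem.Chars.join_nil]
  | cons p rest ih =>
    cases rest with
    | nil => simp [PySem.Chars.join_singleton]
    | cons q rest2 =>
      rw [PySem.Chars.join_cons_cons, ih]
      simp

-- the empty-charset case of A: the inner loop never runs, results stays true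
theorem pvA_closed_nil (poplist : List String) : valid_char_in_string poplist [] = true := by
  show (poplist.foldl (fun st s =>
        s.toList.foldl (fun st c =>
          let st2 := ([] : List String).foldl (pvAStep (0 : Int) c) st
          (st2.1, 0)) st) ((true : Bool), (0 : Int))).1 = true
  suffices h : ∀ (r : Bool),
      (poplist.foldl (fun st s =>
        s.toList.foldl (fun st c =>
          let st2 := ([] : List String).foldl (pvAStep (0 : Int) c) st
          (st2.1, 0)) st) (r, (0 : Int))) = (r, 0) by
    rw [h true]
  induction poplist with
  | nil => intro r; simp
  | cons s rest ih =>
    intro r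
    simp only [List.foldl_cons]
    have hs : ∀ (cl : List Char),
        cl.foldl (fun (st : Bool × Int) c =>
          let st2 := ([] : List String).foldl (pvAStep (0 : Int) c) st
          (st2.1, 0)) (r, (0 : Int)) = (r, 0) := by
      intro cl
      induction cl with
      | nil => rfl
      | cons c rest2 ih2 => simpa using ih2
    rw [hs s.toList, ih]

-- ===== VERDICT (by name: the statement is the Claim_ definition above) =====
theorem valid_char_in_string_spec : Claim_equal_valid_char_in_string := by
  intro poplist charset _
  unfold Spec_valid_char_in_string valid_char_in_string_alt
  by_cases hne : charset = []
  · subst hne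
    rw [if_pos rfl]
    exact pvA_closed_nil poplist
  · rw [if_neg hne, pvA_closed poplist charset hne]
    have hBlist : (charset.foldl
        (fun lv ch => if PySem.Str.len ch = 1 then PySem.Str.replace lv ch "" else lv)
        (PySem.Str.join "" poplist)).toList
        = ((poplist.map String.toList).flatten).filter
            (fun c => decide (String.ofList [c] ∉ charset)) := by
      rw [pvB_fold, PySem.Str.toList_join, String.toList_empty, pvJoin_empty]
    apply Bool.eq_iff_iff.mpr
    constructor
    · intro h
      simp only [beq_iff_eq]
      apply String.ext
      rw [hBlist, String.toList_empty, List.filter_eq_nil_iff]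
      intro c hc
      simp only [List.mem_flatten, List.mem_map] at hc
      obtain ⟨_, ⟨s, hs, rfl⟩, hcs⟩ := hc
      simp only [List.all_eq_true] at h
      simpa using h s hs c hcs
    · intro h
      simp only [beq_iff_eq] at h
      have h2 := congrArg String.toList h
      rw [hBlist, String.toList_empty] at h2
      simp only [List.all_eq_true]
      intro s hs c hc
      by_contra hmem
      have hflat : c ∈ (poplist.map String.toList).flatten :=
        List.mem_flatten.mpr ⟨s.toList, List.mem_map.mpr ⟨s, hs, rfl⟩, hc⟩
      have hnot : String.ofList [c] ∉ charset := by simpa using hmem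
      have hfil : c ∈ ((poplist.map String.toList).flatten).filter
          (fun c => decide (String.ofList [c] ∉ charset)) :=
        List.mem_filter.mpr ⟨hflat, by exact decide_eq_true hnot⟩
      rw [h2] at hfil
      simp at hfil
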